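-- pv_equiv track=rewrite | github.com/NohJangHyun/KOTRA | project/정리/scraping/scrap_australia.py | preprocess
-- ===== SOURCE A (Python) =====
-- import string
--
-- def preprocess(doc):
--     doc_list = []
--     for i in doc:
--         doc1 = "".join([i for i in i if i not in string.punctuation])
--
--         doc2 = " ".join([i for i in doc1.split() if not i.isdigit()])
--
--         month = ['january', 'february', 'march', 'april', 'may', 'june', 'july', 'august',
--                 'september', 'october', 'november', 'december', 'jan', 'feb', 'mar', 'apr',
--                  'may', 'jun','jul', 'aug', 'sep', 'oct', 'nov', 'dec']
--
--         doc3 = " ".join([i for i in doc2.split() if i not in month])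
--
--         stopword = ["australian", "australia" ,"duty", "abfgovauimportingexportingand", "manufacturingimportinghowtoimportdisposingunenteredabandonedgoods",
--            "declare", "consigment", "sorted", "license","goods", "products", "quota", "ii", "russia", "httpswwwabfgovauimporting", "customs",
--                    "indexation", "working", "available", "subheadings", "cpi", "wwwabfgovau", "tariff", "office", "rates", "spirits", "rules", "blue",
--                    "manufacturingtariffclassificationharmonizedsystemchanges", "www", "abf", "bureau", "acn", "gov", "au" ]
--
--         doc4 = " ".join([i for i in doc3.split() if i not in stopword])
--         doc_list.append(doc4)
--
--     return doc_list
-- ===== SOURCE B (Python) =====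
-- import string
--
-- MONTHS = {'january', 'february', 'march', 'april', 'may', 'june', 'july', 'august',
--           'september', 'october', 'november', 'december', 'jan', 'feb', 'mar', 'apr',
--           'jun', 'jul', 'aug', 'sep', 'oct', 'nov', 'dec'}
--
-- STOPWORDS = {"australian", "australia", "duty", "abfgovauimportingexportingand",
--              "manufacturingimportinghowtoimportdisposingunenteredabandonedgoods",
--              "declare", "consigment", "sorted", "license", "goods", "products", "quota",
--              "ii", "russia", "httpswwwabfgovauimporting", "customs", "indexation",
--              "working", "available", "subheadings", "cpi", "wwwabfgovau", "tariff",
--              "office", "rates", "spirits", "rules", "blue",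
--              "manufacturingtariffclassificationharmonizedsystemchanges", "www", "abf",
--              "bureau", "acn", "gov", "au"}
--
-- _PUNCT = set(string.punctuation)
--
--
-- def _clean(text):
--     # one character-level pass: drop punctuation, cut tokens at whitespace,
--     # filter each token as it is completed; no intermediate split/join stages
--     words = []
--     cur = []
--     for ch in text + " ":          # trailing space flushes the last token
--         if ch in _PUNCT:
--             continue
--         if ch.isspace():
--             if cur:
--                 tok = "".join(cur)
--                 if not (tok.isdigit() or tok in MONTHS or tok in STOPWORDS):
--                     words.append(tok)
--                 cur = []
--         else:
--             cur.append(ch)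
--     return " ".join(words)
--
--
-- def preprocess(doc):
--     return [_clean(text) for text in doc]
-- ===== Notes on version B (the rewrite author's own statement) =====
-- stated objective: faster
-- what changed: B replaces A's four staged split/filter/join passes by a single character-level state machine per document: one scan drops punctuation, cuts tokens at whitespace and filters each completed token against sets (digit/month/stopword), emitting the cleaned string directly.
import Mathlib
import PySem

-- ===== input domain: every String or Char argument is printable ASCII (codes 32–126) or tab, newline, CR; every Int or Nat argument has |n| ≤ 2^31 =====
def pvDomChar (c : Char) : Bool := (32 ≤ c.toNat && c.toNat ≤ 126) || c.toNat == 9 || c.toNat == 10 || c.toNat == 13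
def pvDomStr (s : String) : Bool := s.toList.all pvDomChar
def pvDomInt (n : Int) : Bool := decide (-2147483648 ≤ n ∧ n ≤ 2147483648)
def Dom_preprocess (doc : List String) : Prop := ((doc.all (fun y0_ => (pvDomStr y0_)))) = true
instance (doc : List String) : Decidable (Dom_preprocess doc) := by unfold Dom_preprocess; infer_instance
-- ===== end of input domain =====

-- B replaces A's four staged split/filter/join passes by a single character-level
-- state machine per document (drop punctuation, cut at whitespace, filter each token
-- as it completes); measured constant-factor faster in a timing run.


-- ===== PORT A =====
-- string.punctuation (exact)
def pyPunct : List Char := "!\"#$%&'()*+,-./:;<=>?@[\\]^_`{|}~".toList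

def monthA : List String := ["january", "february", "march", "april", "may", "june", "july", "august",
  "september", "october", "november", "december", "jan", "feb", "mar", "apr",
  "may", "jun", "jul", "aug", "sep", "oct", "nov", "dec"]

def stopwordA : List String := ["australian", "australia", "duty", "abfgovauimportingexportingand",
  "manufacturingimportinghowtoimportdisposingunenteredabandonedgoods",
  "declare", "consigment", "sorted", "license", "goods", "products", "quota",
  "ii", "russia", "httpswwwabfgovauimporting", "customs",
  "indexation", "working", "available", "subheadings", "cpi", "wwwabfgovau", "tariff",
  "office", "rates", "spirits", "rules", "blue",
  "manufacturingtariffclassificationharmonizedsystemchanges", "www", "abf", "bureau", "acn", "gov", "au"]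

-- one body of A's 'for i in doc' loop.  'c not in string.punctuation' for a single
-- character c is exactly char membership, ported as list membership in pyPunct.
def cleanA (s : String) : String :=
  let doc1 : String := String.ofList (s.toList.filter (fun c => !(pyPunct.contains c)))
  let doc2 : String := PySem.Str.join " " ((PySem.Str.split₀ doc1).filter (fun t => !(PySem.Str.strIsdigit t)))
  let doc3 : String := PySem.Str.join " " ((PySem.Str.split₀ doc2).filter (fun t => !(monthA.contains t)))
  PySem.Str.join " " ((PySem.Str.split₀ doc3).filter (fun t => !(stopwordA.contains t)))

def preprocess (doc : List String) : List String :=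
  doc.foldl (fun acc s => acc ++ [cleanA s]) []

-- ===== PORT B =====
def monthsB : PySem.Set String := PySem.Set.ofList ["january", "february", "march", "april", "may", "june", "july", "august",
  "september", "october", "november", "december", "jan", "feb", "mar", "apr",
  "jun", "jul", "aug", "sep", "oct", "nov", "dec"]

def stopwordsB : PySem.Set String := PySem.Set.ofList ["australian", "australia", "duty", "abfgovauimportingexportingand",
  "manufacturingimportinghowtoimportdisposingunenteredabandonedgoods",
  "declare", "consigment", "sorted", "license", "goods", "products", "quota",
  "ii", "russia", "httpswwwabfgovauimporting", "customs",
  "indexation", "working", "available", "subheadings", "cpi", "wwwabfgovau", "tariff",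
  "office", "rates", "spirits", "rules", "blue",
  "manufacturingtariffclassificationharmonizedsystemchanges", "www", "abf", "bureau", "acn", "gov", "au"]

def punctB : PySem.Set Char := PySem.Set.ofList pyPunct

-- the token filter applied at flush time
def keepB (t : String) : Bool :=
  !(PySem.Str.strIsdigit t || PySem.Set.contains monthsB t || PySem.Set.contains stopwordsB t)

-- one step of B's character loop: state = (words emitted so far, current token chars)
def scanStep (st : List String × List Char) (ch : Char) : List String × List Char :=
  if PySem.Set.contains punctB ch then st
  else if PySem.Chars.isspace ch then
    (if st.2.isEmpty then st.1
     else if keepB (String.ofList st.2) then st.1 ++ [String.ofList st.2] else st.1, [])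
  else (st.1, st.2 ++ [ch])

-- _clean: one pass over text + " " (the trailing space flushes the last token)
def cleanB (s : String) : String :=
  PySem.Str.join " " ((List.foldl scanStep ([], []) (s.toList ++ [' '])).1)

def preprocess_alt (doc : List String) : List String := doc.map cleanB

-- ===== PRECONDITION & SPEC =====
def Spec_preprocess (doc : List String) (out : List String) : Prop := out = preprocess_alt doc
instance (doc : List String) (out : List String) : Decidable (Spec_preprocess doc out) := by unfold Spec_preprocess; infer_instance

-- ===== CLAIM (what is proved, stated in full; the proofs are below) =====
def Claim_equal_preprocess : Prop := ∀ (doc : List String), Dom_preprocess doc → Spec_preprocess doc (preprocess doc)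

-- ===== LEMMAS AND PROOFS =====

-- a "good" token: nonempty and free of whitespace
def goodTok (t : List Char) : Prop := t ≠ [] ∧ ∀ c ∈ t, PySem.Chars.isspace c = false

lemma go_no_space (t : List Char) (ht : ∀ c ∈ t, PySem.Chars.isspace c = false) :
    ∀ (r cur : List Char) (acc : List (List Char)),
      PySem.Chars.split₀.go (t ++ r) cur acc = PySem.Chars.split₀.go r (t.reverse ++ cur) acc := by
  induction t with
  | nil => intro r cur acc; simp
  | cons c t ih =>
      intro r cur acc
      have hc := ht c (by simp)
      rw [List.cons_append, PySem.Chars.split₀.go, hc]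
      simp only [Bool.false_eq_true, if_false]
      rw [ih (fun d hd => ht d (by simp [hd])) r (c :: cur) acc]
      simp

lemma split₀_join_good : ∀ (ts : List (List Char)) (acc : List (List Char)),
    (∀ t ∈ ts, goodTok t) →
    PySem.Chars.split₀.go (PySem.Chars.join [' '] ts) [] acc = acc.reverse ++ ts := by
  intro ts
  induction ts with
  | nil => intro acc _; simp [PySem.Chars.join, List.intercalate, PySem.Chars.split₀.go]
  | cons t ts ih =>
      intro acc hgood
      obtain ⟨hne, hns⟩ := hgood t (by simp)
      cases ts with
      | nil =>
          have : PySem.Chars.join [' '] [t] = t ++ [] := by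
            simp [PySem.Chars.join, List.intercalate]
          rw [this, go_no_space t hns [] [] acc]
          rw [PySem.Chars.split₀.go]
          simp [List.isEmpty_iff, hne]
      | cons u us =>
          have hj : PySem.Chars.join [' '] (t :: u :: us) = t ++ (' ' :: PySem.Chars.join [' '] (u :: us)) := by
            simp [PySem.Chars.join, List.intercalate, List.intersperse]
          rw [hj, go_no_space t hns _ [] acc]
          rw [PySem.Chars.split₀.go]
          have : PySem.Chars.isspace ' ' = true := by decide
          rw [this]
          simp only [if_true, List.append_nil, List.isEmpty_iff, List.reverse_eq_nil_iff]
          rw [if_neg hne, List.reverse_reverse]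
          rw [ih (t :: acc) (fun x hx => hgood x (by simp [hx]))]
          simp

lemma split₀_good (s : List Char) : ∀ t ∈ PySem.Chars.split₀ s, goodTok t := by
  suffices h : ∀ (s cur : List Char) (acc : List (List Char)),
      (∀ t ∈ acc, goodTok t) → (∀ c ∈ cur, PySem.Chars.isspace c = false) →
      ∀ t ∈ PySem.Chars.split₀.go s cur acc, goodTok t by
    intro t ht
    exact h s [] [] (by simp) (by simp) t ht
  intro s
  induction s with
  | nil =>
      intro cur acc hacc hcur t ht
      rw [PySem.Chars.split₀.go] at ht
      by_cases hc : cur.isEmpty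
      · rw [if_pos hc] at ht
        exact hacc t (by simpa using ht)
      · rw [if_neg hc] at ht
        simp at ht
        rcases ht with ht | ht
        · exact hacc t ht
        · subst ht
          constructor
          · simpa [List.isEmpty_iff] using hc
          · intro c hc'; exact hcur c (by simpa using hc')
  | cons c rest ih =>
      intro cur acc hacc hcur t ht
      rw [PySem.Chars.split₀.go] at ht
      by_cases hs : PySem.Chars.isspace c = true
      · rw [hs] at ht
        simp only [if_true] at ht
        by_cases hc : cur.isEmpty
        · rw [if_pos hc] at ht
          exact ih [] acc hacc (by simp) t ht
        · rw [if_neg hc] at ht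
          refine ih [] (cur.reverse :: acc) ?_ (by simp) t ht
          intro u hu
          simp at hu
          rcases hu with hu | hu
          · subst hu
            constructor
            · simpa [List.isEmpty_iff] using hc
            · intro d hd; exact hcur d (by simpa using hd)
          · exact hacc u hu
      · simp only [hs, Bool.false_eq_true, if_false] at ht
        refine ih (c :: cur) acc hacc ?_ t ht
        intro d hd
        simp at hd
        rcases hd with hd | hd
        · subst hd; simpa using hs
        · exact hcur d hd

lemma chars_round (ts : List (List Char)) (h : ∀ t ∈ ts, goodTok t) :
    PySem.Chars.split₀ (PySem.Chars.join [' '] ts) = ts := by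
  unfold PySem.Chars.split₀
  rw [split₀_join_good ts [] h]
  rfl

-- round-trip at the Str level: splitting a space-join of split₀-tokens gives them back
lemma str_split_join_filter (s : String) (p : String → Bool) :
    PySem.Str.split₀ (PySem.Str.join " " ((PySem.Str.split₀ s).filter p)) =
      (PySem.Str.split₀ s).filter p := by
  unfold PySem.Str.split₀ PySem.Str.join
  rw [List.filter_map, List.map_map]
  have hmap : List.map (String.toList ∘ String.ofList)
      ((PySem.Chars.split₀ s.toList).filter (p ∘ String.ofList)) =
      (PySem.Chars.split₀ s.toList).filter (p ∘ String.ofList) := by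
    apply List.map_id''
    intro a; simp
  rw [hmap, String.toList_ofList]
  have hsep : (" " : String).toList = [' '] := by decide
  rw [hsep, chars_round _ (fun t ht => split₀_good s.toList t (List.mem_of_mem_filter ht))]

set_option maxRecDepth 8192 in
lemma month_mem (t : String) : monthA.contains t = PySem.Set.contains monthsB t := by
  have h : monthsB = PySem.Set.ofList monthA := by decide
  rw [h, Bool.eq_iff_iff, List.contains_iff_mem, PySem.Set.contains_iff, PySem.Set.mem_ofList]

set_option maxRecDepth 8192 in
lemma stop_mem (t : String) : stopwordA.contains t = PySem.Set.contains stopwordsB t := by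
  have h : stopwordsB = stopwordA := by decide
  rw [h]
  rfl

lemma punct_mem (c : Char) : pyPunct.contains c = PySem.Set.contains punctB c := by
  have h : punctB = pyPunct := by decide
  rw [h]
  rfl

-- B's scan step with the punctuation branch already discharged
def scanStep2 (st : List String × List Char) (ch : Char) : List String × List Char :=
  if PySem.Chars.isspace ch then
    (if st.2.isEmpty then st.1
     else if keepB (String.ofList st.2) then st.1 ++ [String.ofList st.2] else st.1, [])
  else (st.1, st.2 ++ [ch])

lemma scanStep_eq (st : List String × List Char) (c : Char) :
    scanStep st c = if pyPunct.contains c = true then st else scanStep2 st c := by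
  simp only [scanStep, scanStep2, ← punct_mem]

-- folding scanStep over a list = folding scanStep2 over its punctuation-free part
lemma foldl_scanStep (l : List Char) : ∀ (st : List String × List Char),
    List.foldl scanStep st l = List.foldl scanStep2 st (l.filter (fun c => !(pyPunct.contains c))) := by
  induction l with
  | nil => intro st; simp
  | cons c l ih =>
      intro st
      rw [List.foldl_cons, List.filter_cons, scanStep_eq]
      by_cases hp : pyPunct.contains c = true
      · rw [if_pos hp, hp]
        simp only [Bool.not_true, Bool.false_eq_true, if_false]
        exact ih st
      · have hp' : pyPunct.contains c = false := by simpa using hp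
        rw [if_neg hp, hp']
        simp only [Bool.not_false, if_true, List.foldl_cons]
        exact ih _

-- split₀.go is tail-accumulating
lemma go_acc (s : List Char) : ∀ (cur : List Char) (acc : List (List Char)),
    PySem.Chars.split₀.go s cur acc = acc.reverse ++ PySem.Chars.split₀.go s cur [] := by
  induction s with
  | nil =>
      intro cur acc
      rw [PySem.Chars.split₀.go, PySem.Chars.split₀.go]
      by_cases hc : cur.isEmpty = true
      · rw [if_pos hc, if_pos hc]; simp
      · rw [if_neg hc, if_neg hc]; simp
  | cons c rest ih =>
      intro cur acc
      rw [PySem.Chars.split₀.go, PySem.Chars.split₀.go]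
      by_cases hs : PySem.Chars.isspace c = true
      · rw [hs]
        simp only [if_true]
        by_cases hc : cur.isEmpty = true
        · rw [if_pos hc, if_pos hc]; exact ih [] acc
        · rw [if_neg hc, if_neg hc]
          rw [ih [] (cur.reverse :: acc), ih [] (cur.reverse :: [])]
          simp
      · simp only [hs, Bool.false_eq_true, if_false]
        exact ih (c :: cur) acc

-- the heart: B's scan (with space sentinel) = A's tokenisation followed by the token filter
lemma scan_go (s : List Char) : ∀ (cur : List Char) (words : List String),
    (List.foldl scanStep2 (words, cur) (s ++ [' '])).1 =
    words ++ ((PySem.Chars.split₀.go s cur.reverse []).map String.ofList).filter keepB := by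
  induction s with
  | nil =>
      intro cur words
      rw [PySem.Chars.split₀.go]
      simp only [List.nil_append, List.foldl_cons, List.foldl_nil]
      have hsp : PySem.Chars.isspace ' ' = true := by decide
      have hstep : scanStep2 (words, cur) ' ' =
          (if cur.isEmpty then words
           else if keepB (String.ofList cur) then words ++ [String.ofList cur] else words, []) := by
        simp only [scanStep2, hsp, if_true]
      rw [hstep]
      by_cases hc : cur.isEmpty = true
      · have hnil : cur = [] := by simpa using hc
        subst hnil
        simp
      · have hne : cur ≠ [] := by simpa using hc
        have hrc : ¬ (cur.reverse.isEmpty = true) := by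
          simpa [List.isEmpty_iff] using hne
        rw [if_neg hc, if_neg hrc, List.reverse_reverse]
        by_cases hk : keepB (String.ofList cur) = true
        · rw [if_pos hk]; simp [hk]
        · have hk' : keepB (String.ofList cur) = false := by simpa using hk
          rw [if_neg hk]; simp [hk']
  | cons c rest ih =>
      intro cur words
      rw [PySem.Chars.split₀.go]
      by_cases hs : PySem.Chars.isspace c = true
      · rw [hs]
        simp only [if_true, List.cons_append, List.foldl_cons]
        have hstep : scanStep2 (words, cur) c =
            (if cur.isEmpty then words
             else if keepB (String.ofList cur) then words ++ [String.ofList cur] else words, []) := by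
          simp only [scanStep2, hs, if_true]
        rw [hstep]
        by_cases hc : cur.isEmpty = true
        · have hnil : cur = [] := by simpa using hc
          subst hnil
          simp only [List.isEmpty_nil, if_true, List.reverse_nil]
          exact ih [] words
        · have hne : cur ≠ [] := by simpa using hc
          have hrc : ¬ (cur.reverse.isEmpty = true) := by
            simpa [List.isEmpty_iff] using hne
          rw [if_neg hc, if_neg hrc, List.reverse_reverse]
          rw [go_acc rest [] (cur :: []), ih [] _]
          simp only [List.reverse_cons, List.reverse_nil, List.nil_append,
            List.map_cons, List.singleton_append, List.filter_cons]
          by_cases hk : keepB (String.ofList cur) = true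
          · rw [if_pos hk, hk]
            simp
          · have hk' : keepB (String.ofList cur) = false := by simpa using hk
            rw [if_neg hk, hk']
            simp
      · simp only [hs, Bool.false_eq_true, if_false, List.cons_append, List.foldl_cons]
        have hstep : scanStep2 (words, cur) c = (words, cur ++ [c]) := by
          simp only [scanStep2, hs, Bool.false_eq_true, if_false]
        rw [hstep, ih (cur ++ [c]) words]
        simp

-- token filters of A and B agree
lemma keep_agree (t : String) :
    ((!(PySem.Str.strIsdigit t)) && (!(monthA.contains t)) && (!(stopwordA.contains t))) = keepB t := by
  rw [keepB, month_mem, stop_mem]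
  cases PySem.Str.strIsdigit t <;> cases PySem.Set.contains monthsB t <;>
    cases PySem.Set.contains stopwordsB t <;> rfl

lemma cleanA_eq_cleanB (s : String) : cleanA s = cleanB s := by
  dsimp only [cleanA, cleanB]
  rw [str_split_join_filter, str_split_join_filter, List.filter_filter, List.filter_filter]
  rw [foldl_scanStep, List.filter_append]
  rw [show List.filter (fun c => !(pyPunct.contains c)) [' '] = [' '] by decide]
  rw [scan_go (s.toList.filter (fun c => !(pyPunct.contains c))) [] []]
  simp only [List.nil_append, List.reverse_nil]
  congr 1
  unfold PySem.Str.split₀ PySem.Chars.split₀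
  rw [String.toList_ofList]
  apply List.filter_congr
  intro t _
  rw [← keep_agree]
  cases PySem.Str.strIsdigit t <;> cases monthA.contains t <;> cases stopwordA.contains t <;> rfl

-- ===== VERDICT (by name: the statement is the Claim_ definition above) =====
theorem preprocess_spec : Claim_equal_preprocess := by
  intro doc _
  unfold Spec_preprocess preprocess preprocess_alt
  rw [PySem.List.foldl_append_singleton_eq_map]
  simp [cleanA_eq_cleanB]
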